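-- pv_equiv track=rewrite | github.com/dibyam12/Nepse-Data | stocks/management/commands/scrape_agm.py | clean_event_type
-- ===== SOURCE A (Python) =====
-- def clean_event_type(title, current_type):
--     title = title.lower()
--     t = current_type.lower()
--
--     if 'agm' in title or 'sgm' in title or 'agm' in t or 'sgm' in t:
--         return 'AGM/SGM'
--     elif 'ipo' in title or 'ipo' in t or 'initial public offering' in title:
--         return 'IPO'
--     elif 'fpo' in title or 'fpo' in t or 'further public offering' in title:
--         return 'FPO'
--     elif 'dividend' in title or 'dividend' in t or 'bonus' in title or 'cash' in title:
--         return 'Dividend'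
--     elif 'right' in title or 'right' in t:
--         return 'Right Share'
--     elif 'auction' in title or 'auction' in t:
--         return 'Auction'
--     elif 'book closure' in title or 'book closure' in t or 'closure' in title:
--         return 'Book Closure'
--     elif 'bond' in title or 'bond' in t or 'debenture' in title:
--         return 'Bond / Debenture'
--     elif 'mutual fund' in title or 'mutual fund' in t:
--         return 'Mutual Fund'
--     elif 'special' in title or 'special' in t:
--         return 'Special'
--     else:
--         if any(c.isdigit() for c in t) and len(t) < 10:
--             return 'Other'
--         return current_type.title()
-- ===== SOURCE B (Python) =====
-- # Different decomposition: a flat keyword index with priorities; B evaluates ALL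
-- # keyword tests, takes the MINIMUM matched priority, and indexes a label table.
-- LABELS = ['AGM/SGM', 'IPO', 'FPO', 'Dividend', 'Right Share', 'Auction',
--           'Book Closure', 'Bond / Debenture', 'Mutual Fund', 'Special']
--
-- # (keyword, tested against title?, tested against current_type?, priority)
-- KEYWORDS = [
--     ('agm', True, True, 0), ('sgm', True, True, 0),
--     ('ipo', True, True, 1), ('initial public offering', True, False, 1),
--     ('fpo', True, True, 2), ('further public offering', True, False, 2),
--     ('dividend', True, True, 3), ('bonus', True, False, 3), ('cash', True, False, 3),
--     ('right', True, True, 4),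
--     ('auction', True, True, 5),
--     ('book closure', True, True, 6), ('closure', True, False, 6),
--     ('bond', True, True, 7), ('debenture', True, False, 7),
--     ('mutual fund', True, True, 8),
--     ('special', True, True, 9),
-- ]
--
--
-- def clean_event_type(title, current_type):
--     low_title = title.lower()
--     low_type = current_type.lower()
--     matched = [p for kw, in_title, in_type, p in KEYWORDS
--                if (in_title and kw in low_title) or (in_type and kw in low_type)]
--     if matched:
--         return LABELS[min(matched)]
--     if any(c.isdigit() for c in low_type) and len(low_type) < 10:
--         return 'Other'
--     return current_type.title()
-- ===== Notes on version B (the rewrite author's own statement) =====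
-- stated objective: alternative
-- what changed: Replaces the ten-branch short-circuiting if/elif chain by a flat keyword index with numeric priorities: B evaluates every keyword membership test, collects the priorities of all matches, and returns the label at the minimum matched priority (same digit/len fallback).
import Mathlib
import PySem

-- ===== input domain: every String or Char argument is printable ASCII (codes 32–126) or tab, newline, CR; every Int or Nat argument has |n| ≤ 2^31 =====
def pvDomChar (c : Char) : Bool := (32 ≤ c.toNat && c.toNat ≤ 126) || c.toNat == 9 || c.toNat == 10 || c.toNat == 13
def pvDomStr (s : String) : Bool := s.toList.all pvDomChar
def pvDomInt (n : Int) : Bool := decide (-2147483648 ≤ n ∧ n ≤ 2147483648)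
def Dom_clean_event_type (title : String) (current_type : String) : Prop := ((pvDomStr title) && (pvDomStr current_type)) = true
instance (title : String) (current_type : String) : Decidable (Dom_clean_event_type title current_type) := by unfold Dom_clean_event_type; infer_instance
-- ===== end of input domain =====

-- B replaces A's short-circuiting if/elif chain by a flat keyword index with numeric
-- priorities: it evaluates every keyword test, collects all matches, and returns the
-- label of the minimum matched priority (objective: alternative decomposition; same cost).

-- shared primitive: Python str.title() (no PySem equivalent); hand port, exact on the
-- ASCII domain, where Python's "cased" characters are exactly the letters:
-- a letter is uppercased after a non-letter and lowercased after a letter; others unchanged.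
def pyTitleGo : Bool → List Char → List Char
  | _, [] => []
  | prevAlpha, c :: rest =>
    (if PySem.Chars.isalpha c then
       (if prevAlpha then PySem.Chars.lowerChar c else PySem.Chars.upperChar c)
     else c) :: pyTitleGo (PySem.Chars.isalpha c) rest

def pyTitle (s : String) : String := String.ofList (pyTitleGo false s.toList)

-- ===== PORT A =====
def clean_event_type (title : String) (current_type : String) : String :=
  let title := PySem.Str.lower title
  let t := PySem.Str.lower current_type
  if PySem.Str.isIn "agm" title || PySem.Str.isIn "sgm" title || PySem.Str.isIn "agm" t || PySem.Str.isIn "sgm" t then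
    "AGM/SGM"
  else if PySem.Str.isIn "ipo" title || PySem.Str.isIn "ipo" t || PySem.Str.isIn "initial public offering" title then
    "IPO"
  else if PySem.Str.isIn "fpo" title || PySem.Str.isIn "fpo" t || PySem.Str.isIn "further public offering" title then
    "FPO"
  else if PySem.Str.isIn "dividend" title || PySem.Str.isIn "dividend" t || PySem.Str.isIn "bonus" title || PySem.Str.isIn "cash" title then
    "Dividend"
  else if PySem.Str.isIn "right" title || PySem.Str.isIn "right" t then
    "Right Share"
  else if PySem.Str.isIn "auction" title || PySem.Str.isIn "auction" t then
    "Auction"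
  else if PySem.Str.isIn "book closure" title || PySem.Str.isIn "book closure" t || PySem.Str.isIn "closure" title then
    "Book Closure"
  else if PySem.Str.isIn "bond" title || PySem.Str.isIn "bond" t || PySem.Str.isIn "debenture" title then
    "Bond / Debenture"
  else if PySem.Str.isIn "mutual fund" title || PySem.Str.isIn "mutual fund" t then
    "Mutual Fund"
  else if PySem.Str.isIn "special" title || PySem.Str.isIn "special" t then
    "Special"
  else
    if (t.toList.any PySem.Chars.isdigit) && PySem.Str.len t < 10 then
      "Other"
    else
      pyTitle current_type

-- ===== PORT B =====
def cet_labels : List String :=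
  ["AGM/SGM", "IPO", "FPO", "Dividend", "Right Share", "Auction",
   "Book Closure", "Bond / Debenture", "Mutual Fund", "Special"]

-- (keyword, tested against title?, tested against current_type?, priority)
def cet_keywords : List (String × Bool × Bool × Nat) :=
  [ ("agm", true, true, 0), ("sgm", true, true, 0),
    ("ipo", true, true, 1), ("initial public offering", true, false, 1),
    ("fpo", true, true, 2), ("further public offering", true, false, 2),
    ("dividend", true, true, 3), ("bonus", true, false, 3), ("cash", true, false, 3),
    ("right", true, true, 4),
    ("auction", true, true, 5),
    ("book closure", true, true, 6), ("closure", true, false, 6),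
    ("bond", true, true, 7), ("debenture", true, false, 7),
    ("mutual fund", true, true, 8),
    ("special", true, true, 9) ]

def clean_event_type_alt (title : String) (current_type : String) : String :=
  let lowTitle := PySem.Str.lower title
  let lowType := PySem.Str.lower current_type
  let matched := cet_keywords.filterMap (fun r =>
    if (r.2.1 && PySem.Str.isIn r.1 lowTitle) || (r.2.2.1 && PySem.Str.isIn r.1 lowType)
    then some r.2.2.2 else none)
  match matched.min? with
  | some p => cet_labels.getD p ""   -- LABELS[min(matched)]; every priority is < 10, so getD is exact
  | none =>
    if (lowType.toList.any PySem.Chars.isdigit) && PySem.Str.len lowType < 10 then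
      "Other"
    else
      pyTitle current_type

-- ===== PRECONDITION & SPEC =====
def Spec_clean_event_type (title : String) (current_type : String) (out : String) : Prop := out = clean_event_type_alt title current_type
instance (title : String) (current_type : String) (out : String) : Decidable (Spec_clean_event_type title current_type out) := by unfold Spec_clean_event_type; infer_instance

-- ===== CLAIM (what is proved, stated in full; the proofs are below) =====
def Claim_equal_clean_event_type : Prop := ∀ (title : String) (current_type : String), Dom_clean_event_type title current_type → Spec_clean_event_type title current_type (clean_event_type title current_type)

-- ===== LEMMAS AND PROOFS =====

-- folding Nat.min over a list whose members are all ≥ p, starting from a value ≥ p,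
-- with p among the candidates, yields p
theorem nat_foldl_min_eq (p : Nat) (l : List Nat) : ∀ (a : Nat), (p = a ∨ p ∈ l) → (∀ x ∈ l, p ≤ x) → p ≤ a → l.foldl min a = p := by
  induction l with
  | nil =>
    intro a h _ _
    rcases h with rfl | h
    · rfl
    · cases h
  | cons b t ih =>
    intro a h hb hpa
    simp only [List.foldl]
    apply ih (min a b)
    · rcases h with rfl | h
      · left; have := hb b (by simp); omega
      · rcases List.mem_cons.mp h with rfl | h
        · left; omega
        · right; exact h
    · intro x hx; exact hb x (by simp [hx])
    · have := hb b (by simp); omega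

-- min? of a list containing p with all members ≥ p is some p
theorem nat_min?_eq_some {l : List Nat} {p : Nat} (hmem : p ∈ l) (hle : ∀ x ∈ l, p ≤ x) : l.min? = some p := by
  cases l with
  | nil => cases hmem
  | cons a t =>
    simp only [List.min?, Option.some.injEq]
    refine nat_foldl_min_eq p t a ?_ ?_ ?_
    · rcases List.mem_cons.mp hmem with rfl | h
      · exact Or.inl rfl
      · exact Or.inr h
    · intro x hx; exact hle x (by simp [hx])
    · exact hle a (by simp)

-- if every keyword of priority < p fails its test, every matched priority is ≥ p
theorem cet_bound (lt lc : String) (p : Nat)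
    (h : ∀ kw, kw ∈ cet_keywords → kw.2.2.2 < p → ((kw.2.1 && PySem.Str.isIn kw.1 lt) || (kw.2.2.1 && PySem.Str.isIn kw.1 lc)) = false) :
    ∀ x ∈ cet_keywords.filterMap (fun r => if (r.2.1 && PySem.Str.isIn r.1 lt) || (r.2.2.1 && PySem.Str.isIn r.1 lc) then some r.2.2.2 else none), p ≤ x := by
  intro x hx
  rw [List.mem_filterMap] at hx
  obtain ⟨r, hr, hf⟩ := hx
  rcases Nat.lt_or_ge r.2.2.2 p with hp | hp
  · rw [h r hr hp] at hf
    simp at hf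
  · split at hf
    · injection hf with he
      omega
    · exact absurd hf (by simp)

set_option maxHeartbeats 4000000 in
theorem clean_event_type_spec : Claim_equal_clean_event_type := by
  intro title current_type _
  unfold Spec_clean_event_type
  simp only [clean_event_type, clean_event_type_alt]
  by_cases H0 : (PySem.Str.isIn "agm" (PySem.Str.lower title)) = true
  · simp at H0
    have hm : (List.filterMap (fun r => if (r.2.1 && PySem.Str.isIn r.1 (PySem.Str.lower title)) || (r.2.2.1 && PySem.Str.isIn r.1 (PySem.Str.lower current_type)) then some r.2.2.2 else none) cet_keywords).min? = some 0 := by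
      apply nat_min?_eq_some
      · exact List.mem_filterMap.mpr ⟨("agm", true, true, 0), by decide, by simp [H0]⟩
      · exact cet_bound (PySem.Str.lower title) (PySem.Str.lower current_type) 0 (by intro kw hkw hlt; fin_cases hkw <;> simp_all)
    rw [hm]
    simp [H0, cet_labels, List.getD]
  simp at H0
  by_cases H1 : (PySem.Str.isIn "agm" (PySem.Str.lower current_type)) = true
  · simp at H1
    have hm : (List.filterMap (fun r => if (r.2.1 && PySem.Str.isIn r.1 (PySem.Str.lower title)) || (r.2.2.1 && PySem.Str.isIn r.1 (PySem.Str.lower current_type)) then some r.2.2.2 else none) cet_keywords).min? = some 0 := by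
      apply nat_min?_eq_some
      · exact List.mem_filterMap.mpr ⟨("agm", true, true, 0), by decide, by simp [H0, H1]⟩
      · exact cet_bound (PySem.Str.lower title) (PySem.Str.lower current_type) 0 (by intro kw hkw hlt; fin_cases hkw <;> simp_all)
    rw [hm]
    simp [H0, H1, cet_labels, List.getD]
  simp at H1
  by_cases H2 : (PySem.Str.isIn "sgm" (PySem.Str.lower title)) = true
  · simp at H2
    have hm : (List.filterMap (fun r => if (r.2.1 && PySem.Str.isIn r.1 (PySem.Str.lower title)) || (r.2.2.1 && PySem.Str.isIn r.1 (PySem.Str.lower current_type)) then some r.2.2.2 else none) cet_keywords).min? = some 0 := by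
      apply nat_min?_eq_some
      · exact List.mem_filterMap.mpr ⟨("sgm", true, true, 0), by decide, by simp [H0, H1, H2]⟩
      · exact cet_bound (PySem.Str.lower title) (PySem.Str.lower current_type) 0 (by intro kw hkw hlt; fin_cases hkw <;> simp_all)
    rw [hm]
    simp [H0, H1, H2, cet_labels, List.getD]
  simp at H2
  by_cases H3 : (PySem.Str.isIn "sgm" (PySem.Str.lower current_type)) = true
  · simp at H3
    have hm : (List.filterMap (fun r => if (r.2.1 && PySem.Str.isIn r.1 (PySem.Str.lower title)) || (r.2.2.1 && PySem.Str.isIn r.1 (PySem.Str.lower current_type)) then some r.2.2.2 else none) cet_keywords).min? = some 0 := by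
      apply nat_min?_eq_some
      · exact List.mem_filterMap.mpr ⟨("sgm", true, true, 0), by decide, by simp [H0, H1, H2, H3]⟩
      · exact cet_bound (PySem.Str.lower title) (PySem.Str.lower current_type) 0 (by intro kw hkw hlt; fin_cases hkw <;> simp_all)
    rw [hm]
    simp [H0, H1, H2, H3, cet_labels, List.getD]
  simp at H3
  by_cases H4 : (PySem.Str.isIn "ipo" (PySem.Str.lower title)) = true
  · simp at H4
    have hm : (List.filterMap (fun r => if (r.2.1 && PySem.Str.isIn r.1 (PySem.Str.lower title)) || (r.2.2.1 && PySem.Str.isIn r.1 (PySem.Str.lower current_type)) then some r.2.2.2 else none) cet_keywords).min? = some 1 := by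
      apply nat_min?_eq_some
      · exact List.mem_filterMap.mpr ⟨("ipo", true, true, 1), by decide, by simp [H0, H1, H2, H3, H4]⟩
      · exact cet_bound (PySem.Str.lower title) (PySem.Str.lower current_type) 1 (by intro kw hkw hlt; fin_cases hkw <;> simp_all)
    rw [hm]
    simp [H0, H1, H2, H3, H4, cet_labels, List.getD]
  simp at H4
  by_cases H5 : (PySem.Str.isIn "ipo" (PySem.Str.lower current_type)) = true
  · simp at H5
    have hm : (List.filterMap (fun r => if (r.2.1 && PySem.Str.isIn r.1 (PySem.Str.lower title)) || (r.2.2.1 && PySem.Str.isIn r.1 (PySem.Str.lower current_type)) then some r.2.2.2 else none) cet_keywords).min? = some 1 := by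
      apply nat_min?_eq_some
      · exact List.mem_filterMap.mpr ⟨("ipo", true, true, 1), by decide, by simp [H0, H1, H2, H3, H4, H5]⟩
      · exact cet_bound (PySem.Str.lower title) (PySem.Str.lower current_type) 1 (by intro kw hkw hlt; fin_cases hkw <;> simp_all)
    rw [hm]
    simp [H0, H1, H2, H3, H4, H5, cet_labels, List.getD]
  simp at H5
  by_cases H6 : (PySem.Str.isIn "initial public offering" (PySem.Str.lower title)) = true
  · simp at H6
    have hm : (List.filterMap (fun r => if (r.2.1 && PySem.Str.isIn r.1 (PySem.Str.lower title)) || (r.2.2.1 && PySem.Str.isIn r.1 (PySem.Str.lower current_type)) then some r.2.2.2 else none) cet_keywords).min? = some 1 := by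
      apply nat_min?_eq_some
      · exact List.mem_filterMap.mpr ⟨("initial public offering", true, false, 1), by decide, by simp [H0, H1, H2, H3, H4, H5, H6]⟩
      · exact cet_bound (PySem.Str.lower title) (PySem.Str.lower current_type) 1 (by intro kw hkw hlt; fin_cases hkw <;> simp_all)
    rw [hm]
    simp [H0, H1, H2, H3, H4, H5, H6, cet_labels, List.getD]
  simp at H6
  by_cases H7 : (PySem.Str.isIn "fpo" (PySem.Str.lower title)) = true
  · simp at H7
    have hm : (List.filterMap (fun r => if (r.2.1 && PySem.Str.isIn r.1 (PySem.Str.lower title)) || (r.2.2.1 && PySem.Str.isIn r.1 (PySem.Str.lower current_type)) then some r.2.2.2 else none) cet_keywords).min? = some 2 := by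
      apply nat_min?_eq_some
      · exact List.mem_filterMap.mpr ⟨("fpo", true, true, 2), by decide, by simp [H0, H1, H2, H3, H4, H5, H6, H7]⟩
      · exact cet_bound (PySem.Str.lower title) (PySem.Str.lower current_type) 2 (by intro kw hkw hlt; fin_cases hkw <;> simp_all)
    rw [hm]
    simp [H0, H1, H2, H3, H4, H5, H6, H7, cet_labels, List.getD]
  simp at H7
  by_cases H8 : (PySem.Str.isIn "fpo" (PySem.Str.lower current_type)) = true
  · simp at H8
    have hm : (List.filterMap (fun r => if (r.2.1 && PySem.Str.isIn r.1 (PySem.Str.lower title)) || (r.2.2.1 && PySem.Str.isIn r.1 (PySem.Str.lower current_type)) then some r.2.2.2 else none) cet_keywords).min? = some 2 := by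
      apply nat_min?_eq_some
      · exact List.mem_filterMap.mpr ⟨("fpo", true, true, 2), by decide, by simp [H0, H1, H2, H3, H4, H5, H6, H7, H8]⟩
      · exact cet_bound (PySem.Str.lower title) (PySem.Str.lower current_type) 2 (by intro kw hkw hlt; fin_cases hkw <;> simp_all)
    rw [hm]
    simp [H0, H1, H2, H3, H4, H5, H6, H7, H8, cet_labels, List.getD]
  simp at H8
  by_cases H9 : (PySem.Str.isIn "further public offering" (PySem.Str.lower title)) = true
  · simp at H9
    have hm : (List.filterMap (fun r => if (r.2.1 && PySem.Str.isIn r.1 (PySem.Str.lower title)) || (r.2.2.1 && PySem.Str.isIn r.1 (PySem.Str.lower current_type)) then some r.2.2.2 else none) cet_keywords).min? = some 2 := by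
      apply nat_min?_eq_some
      · exact List.mem_filterMap.mpr ⟨("further public offering", true, false, 2), by decide, by simp [H0, H1, H2, H3, H4, H5, H6, H7, H8, H9]⟩
      · exact cet_bound (PySem.Str.lower title) (PySem.Str.lower current_type) 2 (by intro kw hkw hlt; fin_cases hkw <;> simp_all)
    rw [hm]
    simp [H0, H1, H2, H3, H4, H5, H6, H7, H8, H9, cet_labels, List.getD]
  simp at H9
  by_cases H10 : (PySem.Str.isIn "dividend" (PySem.Str.lower title)) = true
  · simp at H10
    have hm : (List.filterMap (fun r => if (r.2.1 && PySem.Str.isIn r.1 (PySem.Str.lower title)) || (r.2.2.1 && PySem.Str.isIn r.1 (PySem.Str.lower current_type)) then some r.2.2.2 else none) cet_keywords).min? = some 3 := by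
      apply nat_min?_eq_some
      · exact List.mem_filterMap.mpr ⟨("dividend", true, true, 3), by decide, by simp [H0, H1, H2, H3, H4, H5, H6, H7, H8, H9, H10]⟩
      · exact cet_bound (PySem.Str.lower title) (PySem.Str.lower current_type) 3 (by intro kw hkw hlt; fin_cases hkw <;> simp_all)
    rw [hm]
    simp [H0, H1, H2, H3, H4, H5, H6, H7, H8, H9, H10, cet_labels, List.getD]
  simp at H10
  by_cases H11 : (PySem.Str.isIn "dividend" (PySem.Str.lower current_type)) = true
  · simp at H11
    have hm : (List.filterMap (fun r => if (r.2.1 && PySem.Str.isIn r.1 (PySem.Str.lower title)) || (r.2.2.1 && PySem.Str.isIn r.1 (PySem.Str.lower current_type)) then some r.2.2.2 else none) cet_keywords).min? = some 3 := by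
      apply nat_min?_eq_some
      · exact List.mem_filterMap.mpr ⟨("dividend", true, true, 3), by decide, by simp [H0, H1, H2, H3, H4, H5, H6, H7, H8, H9, H10, H11]⟩
      · exact cet_bound (PySem.Str.lower title) (PySem.Str.lower current_type) 3 (by intro kw hkw hlt; fin_cases hkw <;> simp_all)
    rw [hm]
    simp [H0, H1, H2, H3, H4, H5, H6, H7, H8, H9, H10, H11, cet_labels, List.getD]
  simp at H11
  by_cases H12 : (PySem.Str.isIn "bonus" (PySem.Str.lower title)) = true
  · simp at H12
    have hm : (List.filterMap (fun r => if (r.2.1 && PySem.Str.isIn r.1 (PySem.Str.lower title)) || (r.2.2.1 && PySem.Str.isIn r.1 (PySem.Str.lower current_type)) then some r.2.2.2 else none) cet_keywords).min? = some 3 := by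
      apply nat_min?_eq_some
      · exact List.mem_filterMap.mpr ⟨("bonus", true, false, 3), by decide, by simp [H0, H1, H2, H3, H4, H5, H6, H7, H8, H9, H10, H11, H12]⟩
      · exact cet_bound (PySem.Str.lower title) (PySem.Str.lower current_type) 3 (by intro kw hkw hlt; fin_cases hkw <;> simp_all)
    rw [hm]
    simp [H0, H1, H2, H3, H4, H5, H6, H7, H8, H9, H10, H11, H12, cet_labels, List.getD]
  simp at H12
  by_cases H13 : (PySem.Str.isIn "cash" (PySem.Str.lower title)) = true
  · simp at H13
    have hm : (List.filterMap (fun r => if (r.2.1 && PySem.Str.isIn r.1 (PySem.Str.lower title)) || (r.2.2.1 && PySem.Str.isIn r.1 (PySem.Str.lower current_type)) then some r.2.2.2 else none) cet_keywords).min? = some 3 := by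
      apply nat_min?_eq_some
      · exact List.mem_filterMap.mpr ⟨("cash", true, false, 3), by decide, by simp [H0, H1, H2, H3, H4, H5, H6, H7, H8, H9, H10, H11, H12, H13]⟩
      · exact cet_bound (PySem.Str.lower title) (PySem.Str.lower current_type) 3 (by intro kw hkw hlt; fin_cases hkw <;> simp_all)
    rw [hm]
    simp [H0, H1, H2, H3, H4, H5, H6, H7, H8, H9, H10, H11, H12, H13, cet_labels, List.getD]
  simp at H13
  by_cases H14 : (PySem.Str.isIn "right" (PySem.Str.lower title)) = true
  · simp at H14
    have hm : (List.filterMap (fun r => if (r.2.1 && PySem.Str.isIn r.1 (PySem.Str.lower title)) || (r.2.2.1 && PySem.Str.isIn r.1 (PySem.Str.lower current_type)) then some r.2.2.2 else none) cet_keywords).min? = some 4 := by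
      apply nat_min?_eq_some
      · exact List.mem_filterMap.mpr ⟨("right", true, true, 4), by decide, by simp [H0, H1, H2, H3, H4, H5, H6, H7, H8, H9, H10, H11, H12, H13, H14]⟩
      · exact cet_bound (PySem.Str.lower title) (PySem.Str.lower current_type) 4 (by intro kw hkw hlt; fin_cases hkw <;> simp_all)
    rw [hm]
    simp [H0, H1, H2, H3, H4, H5, H6, H7, H8, H9, H10, H11, H12, H13, H14, cet_labels, List.getD]
  simp at H14
  by_cases H15 : (PySem.Str.isIn "right" (PySem.Str.lower current_type)) = true
  · simp at H15
    have hm : (List.filterMap (fun r => if (r.2.1 && PySem.Str.isIn r.1 (PySem.Str.lower title)) || (r.2.2.1 && PySem.Str.isIn r.1 (PySem.Str.lower current_type)) then some r.2.2.2 else none) cet_keywords).min? = some 4 := by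
      apply nat_min?_eq_some
      · exact List.mem_filterMap.mpr ⟨("right", true, true, 4), by decide, by simp [H0, H1, H2, H3, H4, H5, H6, H7, H8, H9, H10, H11, H12, H13, H14, H15]⟩
      · exact cet_bound (PySem.Str.lower title) (PySem.Str.lower current_type) 4 (by intro kw hkw hlt; fin_cases hkw <;> simp_all)
    rw [hm]
    simp [H0, H1, H2, H3, H4, H5, H6, H7, H8, H9, H10, H11, H12, H13, H14, H15, cet_labels, List.getD]
  simp at H15
  by_cases H16 : (PySem.Str.isIn "auction" (PySem.Str.lower title)) = true
  · simp at H16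
    have hm : (List.filterMap (fun r => if (r.2.1 && PySem.Str.isIn r.1 (PySem.Str.lower title)) || (r.2.2.1 && PySem.Str.isIn r.1 (PySem.Str.lower current_type)) then some r.2.2.2 else none) cet_keywords).min? = some 5 := by
      apply nat_min?_eq_some
      · exact List.mem_filterMap.mpr ⟨("auction", true, true, 5), by decide, by simp [H0, H1, H2, H3, H4, H5, H6, H7, H8, H9, H10, H11, H12, H13, H14, H15, H16]⟩
      · exact cet_bound (PySem.Str.lower title) (PySem.Str.lower current_type) 5 (by intro kw hkw hlt; fin_cases hkw <;> simp_all)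
    rw [hm]
    simp [H0, H1, H2, H3, H4, H5, H6, H7, H8, H9, H10, H11, H12, H13, H14, H15, H16, cet_labels, List.getD]
  simp at H16
  by_cases H17 : (PySem.Str.isIn "auction" (PySem.Str.lower current_type)) = true
  · simp at H17
    have hm : (List.filterMap (fun r => if (r.2.1 && PySem.Str.isIn r.1 (PySem.Str.lower title)) || (r.2.2.1 && PySem.Str.isIn r.1 (PySem.Str.lower current_type)) then some r.2.2.2 else none) cet_keywords).min? = some 5 := by
      apply nat_min?_eq_some
      · exact List.mem_filterMap.mpr ⟨("auction", true, true, 5), by decide, by simp [H0, H1, H2, H3, H4, H5, H6, H7, H8, H9, H10, H11, H12, H13, H14, H15, H16, H17]⟩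
      · exact cet_bound (PySem.Str.lower title) (PySem.Str.lower current_type) 5 (by intro kw hkw hlt; fin_cases hkw <;> simp_all)
    rw [hm]
    simp [H0, H1, H2, H3, H4, H5, H6, H7, H8, H9, H10, H11, H12, H13, H14, H15, H16, H17, cet_labels, List.getD]
  simp at H17
  by_cases H18 : (PySem.Str.isIn "book closure" (PySem.Str.lower title)) = true
  · simp at H18
    have hm : (List.filterMap (fun r => if (r.2.1 && PySem.Str.isIn r.1 (PySem.Str.lower title)) || (r.2.2.1 && PySem.Str.isIn r.1 (PySem.Str.lower current_type)) then some r.2.2.2 else none) cet_keywords).min? = some 6 := by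
      apply nat_min?_eq_some
      · exact List.mem_filterMap.mpr ⟨("book closure", true, true, 6), by decide, by simp [H0, H1, H2, H3, H4, H5, H6, H7, H8, H9, H10, H11, H12, H13, H14, H15, H16, H17, H18]⟩
      · exact cet_bound (PySem.Str.lower title) (PySem.Str.lower current_type) 6 (by intro kw hkw hlt; fin_cases hkw <;> simp_all)
    rw [hm]
    simp [H0, H1, H2, H3, H4, H5, H6, H7, H8, H9, H10, H11, H12, H13, H14, H15, H16, H17, H18, cet_labels, List.getD]
  simp at H18
  by_cases H19 : (PySem.Str.isIn "book closure" (PySem.Str.lower current_type)) = true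
  · simp at H19
    have hm : (List.filterMap (fun r => if (r.2.1 && PySem.Str.isIn r.1 (PySem.Str.lower title)) || (r.2.2.1 && PySem.Str.isIn r.1 (PySem.Str.lower current_type)) then some r.2.2.2 else none) cet_keywords).min? = some 6 := by
      apply nat_min?_eq_some
      · exact List.mem_filterMap.mpr ⟨("book closure", true, true, 6), by decide, by simp [H0, H1, H2, H3, H4, H5, H6, H7, H8, H9, H10, H11, H12, H13, H14, H15, H16, H17, H18, H19]⟩
      · exact cet_bound (PySem.Str.lower title) (PySem.Str.lower current_type) 6 (by intro kw hkw hlt; fin_cases hkw <;> simp_all)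
    rw [hm]
    simp [H0, H1, H2, H3, H4, H5, H6, H7, H8, H9, H10, H11, H12, H13, H14, H15, H16, H17, H18, H19, cet_labels, List.getD]
  simp at H19
  by_cases H20 : (PySem.Str.isIn "closure" (PySem.Str.lower title)) = true
  · simp at H20
    have hm : (List.filterMap (fun r => if (r.2.1 && PySem.Str.isIn r.1 (PySem.Str.lower title)) || (r.2.2.1 && PySem.Str.isIn r.1 (PySem.Str.lower current_type)) then some r.2.2.2 else none) cet_keywords).min? = some 6 := by
      apply nat_min?_eq_some
      · exact List.mem_filterMap.mpr ⟨("closure", true, false, 6), by decide, by simp [H0, H1, H2, H3, H4, H5, H6, H7, H8, H9, H10, H11, H12, H13, H14, H15, H16, H17, H18, H19, H20]⟩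
      · exact cet_bound (PySem.Str.lower title) (PySem.Str.lower current_type) 6 (by intro kw hkw hlt; fin_cases hkw <;> simp_all)
    rw [hm]
    simp [H0, H1, H2, H3, H4, H5, H6, H7, H8, H9, H10, H11, H12, H13, H14, H15, H16, H17, H18, H19, H20, cet_labels, List.getD]
  simp at H20
  by_cases H21 : (PySem.Str.isIn "bond" (PySem.Str.lower title)) = true
  · simp at H21
    have hm : (List.filterMap (fun r => if (r.2.1 && PySem.Str.isIn r.1 (PySem.Str.lower title)) || (r.2.2.1 && PySem.Str.isIn r.1 (PySem.Str.lower current_type)) then some r.2.2.2 else none) cet_keywords).min? = some 7 := by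
      apply nat_min?_eq_some
      · exact List.mem_filterMap.mpr ⟨("bond", true, true, 7), by decide, by simp [H0, H1, H2, H3, H4, H5, H6, H7, H8, H9, H10, H11, H12, H13, H14, H15, H16, H17, H18, H19, H20, H21]⟩
      · exact cet_bound (PySem.Str.lower title) (PySem.Str.lower current_type) 7 (by intro kw hkw hlt; fin_cases hkw <;> simp_all)
    rw [hm]
    simp [H0, H1, H2, H3, H4, H5, H6, H7, H8, H9, H10, H11, H12, H13, H14, H15, H16, H17, H18, H19, H20, H21, cet_labels, List.getD]
  simp at H21
  by_cases H22 : (PySem.Str.isIn "bond" (PySem.Str.lower current_type)) = true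
  · simp at H22
    have hm : (List.filterMap (fun r => if (r.2.1 && PySem.Str.isIn r.1 (PySem.Str.lower title)) || (r.2.2.1 && PySem.Str.isIn r.1 (PySem.Str.lower current_type)) then some r.2.2.2 else none) cet_keywords).min? = some 7 := by
      apply nat_min?_eq_some
      · exact List.mem_filterMap.mpr ⟨("bond", true, true, 7), by decide, by simp [H0, H1, H2, H3, H4, H5, H6, H7, H8, H9, H10, H11, H12, H13, H14, H15, H16, H17, H18, H19, H20, H21, H22]⟩
      · exact cet_bound (PySem.Str.lower title) (PySem.Str.lower current_type) 7 (by intro kw hkw hlt; fin_cases hkw <;> simp_all)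
    rw [hm]
    simp [H0, H1, H2, H3, H4, H5, H6, H7, H8, H9, H10, H11, H12, H13, H14, H15, H16, H17, H18, H19, H20, H21, H22, cet_labels, List.getD]
  simp at H22
  by_cases H23 : (PySem.Str.isIn "debenture" (PySem.Str.lower title)) = true
  · simp at H23
    have hm : (List.filterMap (fun r => if (r.2.1 && PySem.Str.isIn r.1 (PySem.Str.lower title)) || (r.2.2.1 && PySem.Str.isIn r.1 (PySem.Str.lower current_type)) then some r.2.2.2 else none) cet_keywords).min? = some 7 := by
      apply nat_min?_eq_some
      · exact List.mem_filterMap.mpr ⟨("debenture", true, false, 7), by decide, by simp [H0, H1, H2, H3, H4, H5, H6, H7, H8, H9, H10, H11, H12, H13, H14, H15, H16, H17, H18, H19, H20, H21, H22, H23]⟩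
      · exact cet_bound (PySem.Str.lower title) (PySem.Str.lower current_type) 7 (by intro kw hkw hlt; fin_cases hkw <;> simp_all)
    rw [hm]
    simp [H0, H1, H2, H3, H4, H5, H6, H7, H8, H9, H10, H11, H12, H13, H14, H15, H16, H17, H18, H19, H20, H21, H22, H23, cet_labels, List.getD]
  simp at H23
  by_cases H24 : (PySem.Str.isIn "mutual fund" (PySem.Str.lower title)) = true
  · simp at H24
    have hm : (List.filterMap (fun r => if (r.2.1 && PySem.Str.isIn r.1 (PySem.Str.lower title)) || (r.2.2.1 && PySem.Str.isIn r.1 (PySem.Str.lower current_type)) then some r.2.2.2 else none) cet_keywords).min? = some 8 := by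
      apply nat_min?_eq_some
      · exact List.mem_filterMap.mpr ⟨("mutual fund", true, true, 8), by decide, by simp [H0, H1, H2, H3, H4, H5, H6, H7, H8, H9, H10, H11, H12, H13, H14, H15, H16, H17, H18, H19, H20, H21, H22, H23, H24]⟩
      · exact cet_bound (PySem.Str.lower title) (PySem.Str.lower current_type) 8 (by intro kw hkw hlt; fin_cases hkw <;> simp_all)
    rw [hm]
    simp [H0, H1, H2, H3, H4, H5, H6, H7, H8, H9, H10, H11, H12, H13, H14, H15, H16, H17, H18, H19, H20, H21, H22, H23, H24, cet_labels, List.getD]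
  simp at H24
  by_cases H25 : (PySem.Str.isIn "mutual fund" (PySem.Str.lower current_type)) = true
  · simp at H25
    have hm : (List.filterMap (fun r => if (r.2.1 && PySem.Str.isIn r.1 (PySem.Str.lower title)) || (r.2.2.1 && PySem.Str.isIn r.1 (PySem.Str.lower current_type)) then some r.2.2.2 else none) cet_keywords).min? = some 8 := by
      apply nat_min?_eq_some
      · exact List.mem_filterMap.mpr ⟨("mutual fund", true, true, 8), by decide, by simp [H0, H1, H2, H3, H4, H5, H6, H7, H8, H9, H10, H11, H12, H13, H14, H15, H16, H17, H18, H19, H20, H21, H22, H23, H24, H25]⟩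
      · exact cet_bound (PySem.Str.lower title) (PySem.Str.lower current_type) 8 (by intro kw hkw hlt; fin_cases hkw <;> simp_all)
    rw [hm]
    simp [H0, H1, H2, H3, H4, H5, H6, H7, H8, H9, H10, H11, H12, H13, H14, H15, H16, H17, H18, H19, H20, H21, H22, H23, H24, H25, cet_labels, List.getD]
  simp at H25
  by_cases H26 : (PySem.Str.isIn "special" (PySem.Str.lower title)) = true
  · simp at H26
    have hm : (List.filterMap (fun r => if (r.2.1 && PySem.Str.isIn r.1 (PySem.Str.lower title)) || (r.2.2.1 && PySem.Str.isIn r.1 (PySem.Str.lower current_type)) then some r.2.2.2 else none) cet_keywords).min? = some 9 := by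
      apply nat_min?_eq_some
      · exact List.mem_filterMap.mpr ⟨("special", true, true, 9), by decide, by simp [H0, H1, H2, H3, H4, H5, H6, H7, H8, H9, H10, H11, H12, H13, H14, H15, H16, H17, H18, H19, H20, H21, H22, H23, H24, H25, H26]⟩
      · exact cet_bound (PySem.Str.lower title) (PySem.Str.lower current_type) 9 (by intro kw hkw hlt; fin_cases hkw <;> simp_all)
    rw [hm]
    simp [H0, H1, H2, H3, H4, H5, H6, H7, H8, H9, H10, H11, H12, H13, H14, H15, H16, H17, H18, H19, H20, H21, H22, H23, H24, H25, H26, cet_labels, List.getD]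
  simp at H26
  by_cases H27 : (PySem.Str.isIn "special" (PySem.Str.lower current_type)) = true
  · simp at H27
    have hm : (List.filterMap (fun r => if (r.2.1 && PySem.Str.isIn r.1 (PySem.Str.lower title)) || (r.2.2.1 && PySem.Str.isIn r.1 (PySem.Str.lower current_type)) then some r.2.2.2 else none) cet_keywords).min? = some 9 := by
      apply nat_min?_eq_some
      · exact List.mem_filterMap.mpr ⟨("special", true, true, 9), by decide, by simp [H0, H1, H2, H3, H4, H5, H6, H7, H8, H9, H10, H11, H12, H13, H14, H15, H16, H17, H18, H19, H20, H21, H22, H23, H24, H25, H26, H27]⟩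
      · exact cet_bound (PySem.Str.lower title) (PySem.Str.lower current_type) 9 (by intro kw hkw hlt; fin_cases hkw <;> simp_all)
    rw [hm]
    simp [H0, H1, H2, H3, H4, H5, H6, H7, H8, H9, H10, H11, H12, H13, H14, H15, H16, H17, H18, H19, H20, H21, H22, H23, H24, H25, H26, H27, cet_labels, List.getD]
  simp at H27
  simp [cet_keywords, List.filterMap_cons, H0, H1, H2, H3, H4, H5, H6, H7, H8, H9, H10, H11, H12, H13, H14, H15, H16, H17, H18, H19, H20, H21, H22, H23, H24, H25, H26, H27]
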